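-- pv_equiv track=rewrite | github.com/felipelourencoca/2-Q-learning-temp | test_state_coverage.py | _extract_pairs_from_path
-- ===== SOURCE A (Python) =====
-- def _extract_pairs_from_path(path):
--     """Extrai pares de transições consecutivas de um caminho."""
--     pairs = set()
--     transitions = []
--     for i in range(len(path) - 1):
--         state, action = path[i]
--         next_state = path[i + 1][0]
--         if action is not None:
--             transitions.append((state, action, next_state))
--
--     for i in range(len(transitions) - 1):
--         pairs.add((transitions[i], transitions[i + 1]))
--
--     return pairs
-- ===== SOURCE B (Python) =====
-- def _extract_pairs_from_path(path):
--     """Extrai pares de transições consecutivas de um caminho (single fused pass)."""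
--     pairs = set()
--     prev = None
--     for (state, action), (next_state, _na) in zip(path, path[1:]):
--         if action is not None:
--             t = (state, action, next_state)
--             if prev is not None:
--                 pairs.add((prev, t))
--             prev = t
--     return pairs
-- ===== Notes on version B (the rewrite author's own statement) =====
-- stated objective: alternative
-- what changed: A's two index loops (build a transitions list, then pair consecutive entries by index) are fused into one pass over zip(path, path[1:]) that keeps only the previously built transition and adds each adjacent pair to the set immediately, dropping the intermediate list.
import Mathlib
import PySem

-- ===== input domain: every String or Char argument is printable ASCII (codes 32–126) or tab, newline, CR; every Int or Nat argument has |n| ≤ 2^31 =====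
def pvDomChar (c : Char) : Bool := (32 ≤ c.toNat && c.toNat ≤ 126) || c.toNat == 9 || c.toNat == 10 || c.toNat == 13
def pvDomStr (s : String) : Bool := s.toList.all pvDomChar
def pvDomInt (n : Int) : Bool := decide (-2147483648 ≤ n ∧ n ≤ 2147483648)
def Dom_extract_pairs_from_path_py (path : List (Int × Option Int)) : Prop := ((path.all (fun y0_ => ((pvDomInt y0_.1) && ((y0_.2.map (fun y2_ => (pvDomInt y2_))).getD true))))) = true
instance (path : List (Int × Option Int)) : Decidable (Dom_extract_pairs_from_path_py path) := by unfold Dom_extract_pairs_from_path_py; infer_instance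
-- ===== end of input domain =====

-- B fuses A's two index loops into one pass over zip(path, path[1:]) keeping only the previous
-- transition, dropping the intermediate transitions list (objective: alternative decomposition; return value is a set, compared as a set).


-- ===== PORT A =====
-- 'if action is not None' is ported as 'if action.isSome' with 'action.get!' the unwrapped value (exact here, since the branch runs only when the option is some)
def extract_pairs_from_path_py (path : List (Int × Option Int)) : List ((Int × Int × Int) × (Int × Int × Int)) :=
  let transitions : List (Int × Int × Int) :=
    (PySem.List.pyRange 0 ((path.length : Int) - 1) 1).foldl (fun acc i =>
      let sa := PySem.List.pyGetD path i (0, none)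
      let next_state := (PySem.List.pyGetD path (i + 1) (0, none)).1
      if sa.2.isSome then acc ++ [(sa.1, sa.2.get!, next_state)] else acc) []
  (PySem.List.pyRange 0 ((transitions.length : Int) - 1) 1).foldl (fun pairs i =>
      PySem.Set.add pairs (PySem.List.pyGetD transitions i (0, 0, 0),
                           PySem.List.pyGetD transitions (i + 1) (0, 0, 0)))
    PySem.Set.empty

-- ===== PORT B =====
def extract_pairs_from_path_py_alt (path : List (Int × Option Int)) : List ((Int × Int × Int) × (Int × Int × Int)) :=
  ((path.zip path.tail).foldl
    (fun (st : PySem.Set ((Int × Int × Int) × (Int × Int × Int)) × Option (Int × Int × Int)) pr =>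
      if pr.1.2.isSome then
        let t : Int × Int × Int := (pr.1.1, pr.1.2.get!, pr.2.1)
        ((if st.2.isSome then PySem.Set.add st.1 (st.2.get!, t) else st.1), some t)
      else st)
    (PySem.Set.empty, none)).1

-- ===== PRECONDITION & SPEC =====
def Spec_extract_pairs_from_path_py (path : List (Int × Option Int)) (out : List ((Int × Int × Int) × (Int × Int × Int))) : Prop := out = extract_pairs_from_path_py_alt path
instance (path : List (Int × Option Int)) (out : List ((Int × Int × Int) × (Int × Int × Int))) : Decidable (Spec_extract_pairs_from_path_py path out) := by unfold Spec_extract_pairs_from_path_py; infer_instance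

-- ===== CLAIM (what is proved, stated in full; the proofs are below) =====
def Claim_equal_extract_pairs_from_path_py : Prop := ∀ (path : List (Int × Option Int)), Dom_extract_pairs_from_path_py path → Spec_extract_pairs_from_path_py path (extract_pairs_from_path_py path)

-- ===== LEMMAS AND PROOFS =====

-- the filtered transition list of a zipped path
def pvTrans (zs : List ((Int × Option Int) × (Int × Option Int))) : List (Int × Int × Int) :=
  zs.filterMap (fun p => p.1.2.map (fun a => (p.1.1, a, p.2.1)))

-- B's running-previous chain, as a recursion on the transition list
def pvChain (prev : Option (Int × Int × Int)) (ts : List (Int × Int × Int))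
    (acc : PySem.Set ((Int × Int × Int) × (Int × Int × Int))) :
    PySem.Set ((Int × Int × Int) × (Int × Int × Int)) :=
  match ts with
  | [] => acc
  | t :: rest => pvChain (some t) rest (if prev.isSome then PySem.Set.add acc (prev.get!, t) else acc)

-- an index loop over range(len(xs)-1) reading xs[i], xs[i+1] is a fold over zip(xs, xs[1:])
lemma pv_foldl_adjacent {α β : Type} (g : β → α → α → β) (d : α) :
    ∀ (xs : List α) (init : β),
      (PySem.List.pyRange 0 ((xs.length : Int) - 1) 1).foldl
        (fun acc i => g acc (PySem.List.pyGetD xs i d) (PySem.List.pyGetD xs (i + 1) d)) init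
      = (xs.zip xs.tail).foldl (fun acc p => g acc p.1 p.2) init := by
  intro xs
  induction xs with
  | nil => intro init; rw [PySem.List.pyRange_one_eq_nil (by norm_num)]; rfl
  | cons x ys ih =>
    intro init
    cases ys with
    | nil => rw [PySem.List.pyRange_one_eq_nil (by norm_num)]; rfl
    | cons y rest =>
      rw [PySem.List.pyRange_one_cons (by
        simp only [List.length_cons]; push_cast; omega)]
      have hshift :
          (PySem.List.pyRange (0 + 1) (((x :: y :: rest).length : Int) - 1) 1).foldl
            (fun acc i => g acc (PySem.List.pyGetD (x :: y :: rest) i d)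
                                (PySem.List.pyGetD (x :: y :: rest) (i + 1) d))
            (g init (PySem.List.pyGetD (x :: y :: rest) 0 d)
                    (PySem.List.pyGetD (x :: y :: rest) (0 + 1) d))
          = (PySem.List.pyRange 0 (((y :: rest).length : Int) - 1) 1).foldl
            (fun acc i => g acc (PySem.List.pyGetD (y :: rest) i d)
                                (PySem.List.pyGetD (y :: rest) (i + 1) d))
            (g init x y) := by
        rw [PySem.List.pyRange_one, PySem.List.pyRange_one, List.foldl_map, List.foldl_map]
        have hlen : ((((x :: y :: rest).length : Int) - 1) - (0 + 1)).toNat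
            = ((((y :: rest).length : Int) - 1) - 0).toNat := by
          simp
        rw [hlen]
        have hinit : g init (PySem.List.pyGetD (x :: y :: rest) 0 d)
            (PySem.List.pyGetD (x :: y :: rest) (0 + 1) d) = g init x y := by
          have h1 : ((0 : Int) + 1) = ((1 : Nat) : Int) := by norm_num
          rw [h1, PySem.List.pyGetD_natCast, PySem.List.pyGetD_zero_cons]
          simp
        rw [hinit]
        congr 1
        funext acc k
        have h1 : (0 : Int) + 1 + (k : Int) = ((k + 1 : Nat) : Int) := by push_cast; ring
        have h2 : (0 : Int) + 1 + (k : Int) + 1 = ((k + 2 : Nat) : Int) := by push_cast; ring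
        have h3 : (0 : Int) + (k : Int) = ((k : Nat) : Int) := by ring
        have h4 : (0 : Int) + (k : Int) + 1 = ((k + 1 : Nat) : Int) := by push_cast; ring
        rw [h2, h1, h4, h3, PySem.List.pyGetD_natCast, PySem.List.pyGetD_natCast,
            PySem.List.pyGetD_natCast, PySem.List.pyGetD_natCast]
        simp
      rw [List.foldl_cons, hshift, ih (g init x y)]
      rfl

-- A's first loop appends; equal to init ++ the filterMap'd transitions
lemma pv_trans_foldl :
    ∀ (zs : List ((Int × Option Int) × (Int × Option Int))) (init : List (Int × Int × Int)),
      zs.foldl (fun acc p =>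
          if p.1.2.isSome then acc ++ [(p.1.1, p.1.2.get!, p.2.1)] else acc) init
        = init ++ pvTrans zs := by
  intro zs
  induction zs with
  | nil => intro init; simp [pvTrans]
  | cons z zs ih =>
    intro init
    cases h : z.1.2 with
    | none => simp [pvTrans, h, ih]
    | some a => simp [pvTrans, h, ih]

-- B's fold computes the running-previous chain of the filtered transitions
lemma pv_alt_foldl :
    ∀ (zs : List ((Int × Option Int) × (Int × Option Int)))
      (acc : PySem.Set ((Int × Int × Int) × (Int × Int × Int))) (prev : Option (Int × Int × Int)),
      (zs.foldl
        (fun (st : PySem.Set ((Int × Int × Int) × (Int × Int × Int)) × Option (Int × Int × Int)) pr =>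
          if pr.1.2.isSome then
            let t : Int × Int × Int := (pr.1.1, pr.1.2.get!, pr.2.1)
            ((if st.2.isSome then PySem.Set.add st.1 (st.2.get!, t) else st.1), some t)
          else st)
        (acc, prev)).1 = pvChain prev (pvTrans zs) acc := by
  intro zs
  induction zs with
  | nil => intro acc prev; simp [pvTrans, pvChain]
  | cons z zs ih =>
    intro acc prev
    cases h : z.1.2 with
    | none => simp [pvTrans, h, ih]
    | some a =>
      cases prev with
      | none => simp [pvTrans, pvChain, h, ih]
      | some p => simp [pvTrans, pvChain, h, ih]

-- the chain from a known previous element is the fold over consecutive pairs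
lemma pv_chain_zip :
    ∀ (ts : List (Int × Int × Int)) (p : Int × Int × Int)
      (acc : PySem.Set ((Int × Int × Int) × (Int × Int × Int))),
      pvChain (some p) ts acc
      = ((p :: ts).zip ts).foldl (fun s q => PySem.Set.add s q) acc := by
  intro ts
  induction ts with
  | nil => intro p acc; rfl
  | cons t rest ih => intro p acc; simp [pvChain, ih]

lemma pv_chain_none (ts : List (Int × Int × Int)) :
    pvChain none ts PySem.Set.empty
    = (ts.zip ts.tail).foldl (fun s q => PySem.Set.add s q) PySem.Set.empty := by
  cases ts with
  | nil => rfl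
  | cons t rest => simp [pvChain, pv_chain_zip]

-- ===== VERDICT (by name: the statement is the Claim_ definition above) =====
theorem extract_pairs_from_path_py_spec : Claim_equal_extract_pairs_from_path_py := by
  intro path _
  show extract_pairs_from_path_py path = extract_pairs_from_path_py_alt path
  unfold extract_pairs_from_path_py extract_pairs_from_path_py_alt
  rw [pv_alt_foldl]
  simp only []
  have h1 : (PySem.List.pyRange 0 ((path.length : Int) - 1) 1).foldl (fun acc i =>
      let sa := PySem.List.pyGetD path i (0, none)
      let next_state := (PySem.List.pyGetD path (i + 1) (0, none)).1
      if sa.2.isSome then acc ++ [(sa.1, sa.2.get!, next_state)] else acc) []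
      = pvTrans (path.zip path.tail) := by
    have := pv_foldl_adjacent
      (fun acc (sa q : Int × Option Int) =>
        if sa.2.isSome then acc ++ [(sa.1, sa.2.get!, q.1)] else acc) (0, none) path
      ([] : List (Int × Int × Int))
    rw [pv_trans_foldl] at this
    simpa using this
  rw [h1]
  rw [pv_foldl_adjacent (fun pairs a b => PySem.Set.add pairs (a, b)) ((0:Int), (0:Int), (0:Int))]
  rw [pv_chain_none]
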